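-- pv_equiv track=rewrite | github.com/sarishtshreshth0/plag_extract | Project_CodeNet_Python800/p03104/s442075507.py | calc
-- ===== SOURCE A (Python) =====
-- def calc(x):
--     x += 1
--     lst = [0] * 65
--     count = 2
--     for i in range(64):
--         #0の個数を数える
--         tmp = x // count
--         a = x % count
--         a = min(a, count // 2)
--         lst[i] = (x - (a + tmp * count // 2)) % 2
--         count *= 2
--     return lst
-- ===== SOURCE B (Python) =====
-- def calc(x):
--     # XOR of 0..x has a closed form by x % 4; the list is just its first 64 bits.
--     r = x % 4
--     if r == 0:
--         v = x
--     elif r == 1: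
--         v = 1
--     elif r == 2:
--         v = x + 1
--     else:
--         v = 0
--     return [v // 2 ** i % 2 for i in range(64)] + [0]
-- ===== Notes on version B (the rewrite author's own statement) =====
-- stated objective: simpler
-- what changed: Replaces A's per-position digit-counting loop (floor divisions and mins with a doubling modulus) by the closed form for XOR(0..x) chosen by the residue of x modulo four, then reads off that value's low bits directly.
import Mathlib
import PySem

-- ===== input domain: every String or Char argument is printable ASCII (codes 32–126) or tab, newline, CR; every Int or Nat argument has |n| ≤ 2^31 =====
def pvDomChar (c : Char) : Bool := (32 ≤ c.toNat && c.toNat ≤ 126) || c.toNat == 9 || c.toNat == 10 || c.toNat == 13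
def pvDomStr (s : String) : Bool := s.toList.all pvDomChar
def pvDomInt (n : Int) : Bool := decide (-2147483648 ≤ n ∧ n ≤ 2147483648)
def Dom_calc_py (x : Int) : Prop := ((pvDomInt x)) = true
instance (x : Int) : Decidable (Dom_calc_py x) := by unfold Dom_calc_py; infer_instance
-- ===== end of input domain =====

-- B replaces A's 64-iteration digit-counting loop by the closed form for XOR(0..x)
-- (chosen by x % 4) and reads off its 64 low bits; equal return values are proved on the stated domain.

-- ===== PORT A =====
-- loop body of A's 'for i in range(64)'; state = (lst, count)
def calcStep (y : Int) (st : List Int × Int) (i : Int) : List Int × Int :=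
  let lst := st.1
  let count := st.2
  let tmp := PySem.Int.floordiv y count
  let a := PySem.Int.mod y count
  let a := min a (PySem.Int.floordiv count 2)
  (lst.set i.toNat (PySem.Int.mod (y - (a + PySem.Int.floordiv (tmp * count) 2)) 2),
   count * 2)

def calc_py (x : Int) : List Int :=
  let x := x + 1
  ((PySem.List.pyRange 0 64 1).foldl (calcStep x) (List.replicate 65 0, 2)).1

-- ===== PORT B =====
def calc_py_alt (x : Int) : List Int :=
  let r := PySem.Int.mod x 4
  let v : Int := if r = 0 then x else if r = 1 then 1 else if r = 2 then x + 1 else 0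
  ((PySem.List.pyRange 0 64 1).map
    (fun i => PySem.Int.mod (PySem.Int.floordiv v (2 ^ i.toNat)) 2)) ++ [0]

-- ===== PRECONDITION & SPEC =====
def Spec_calc_py (x : Int) (out : List Int) : Prop := out = calc_py_alt x
instance (x : Int) (out : List Int) : Decidable (Spec_calc_py x out) := by unfold Spec_calc_py; infer_instance

-- ===== CLAIM (what is proved, stated in full; the proofs are below) =====
def Claim_equal_calc_py : Prop := ∀ (x : Int), Dom_calc_py x → Spec_calc_py x (calc_py x)

-- ===== LEMMAS AND PROOFS =====

-- the value A stores at position i (its count there is 2*2^i)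
def gbit (y : Int) (i : Nat) : Int :=
  PySem.Int.mod (y - (min (PySem.Int.mod y (2*2^i)) (PySem.Int.floordiv (2*2^i) 2)
      + PySem.Int.floordiv (PySem.Int.floordiv y (2*2^i) * (2*2^i)) 2)) 2

lemma calcStep_eq (y : Int) (l : List Int) (k : Nat) :
    calcStep y (l, 2*2^k) ((k : Nat) : Int) = (l.set k (gbit y k), 2*2^(k+1)) := by
  simp [calcStep, gbit]
  ring

lemma loopA (y : Int) : ∀ (m k : Nat), k + m = 64 →
    (((List.range' k m).map (fun n : Nat => (n:Int))).foldl (calcStep y)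
      ((List.range k).map (gbit y) ++ List.replicate (65 - k) 0, 2*2^k)).1
    = (List.range 64).map (gbit y) ++ [0] := by
  intro m
  induction m with
  | zero =>
    intro k hk
    have : k = 64 := by omega
    subst this
    simp [List.replicate]
  | succ m ih =>
    intro k hk
    rw [List.range'_succ, List.map_cons, List.foldl_cons, calcStep_eq]
    have hlen : ((List.range k).map (gbit y)).length = k := by simp
    have hrep : (65 - k) = (64 - k) + 1 := by omega
    have hset : ((List.range k).map (gbit y) ++ List.replicate (65 - k) 0).set k (gbit y k)
        = (List.range (k+1)).map (gbit y) ++ List.replicate (65 - (k+1)) 0 := by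
      rw [List.set_append, hrep, List.replicate_succ]
      simp [List.range_succ]
    rw [hset]
    exact ih (k+1) (by omega)

-- bit i of A's digit count equals bit i of the closed-form XOR value
lemma gbit_closed (x : Int) (i : Nat) :
    gbit (x+1) i = PySem.Int.mod (PySem.Int.floordiv
      (if PySem.Int.mod x 4 = 0 then x else if PySem.Int.mod x 4 = 1 then 1
       else if PySem.Int.mod x 4 = 2 then x + 1 else 0) (2^i)) 2 := by
  rw [PySem.Int.mod_eq_emod_of_pos (by norm_num : (0:Int) < 4)]
  cases i with
  | zero =>
    unfold gbit
    norm_num [PySem.Int.floordiv_eq_ediv_of_pos, PySem.Int.mod_eq_emod_of_pos]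
    split_ifs with h1 h2 h3 <;> omega
  | succ j =>
    unfold gbit
    set y := x + 1 with hy0
    have hc' : (0:Int) < 2^j := by positivity
    set c' : Int := 2^j with hcdef
    rw [show (2:Int)*2^(j+1) = 4*c' from by rw [pow_succ]; ring,
        show (2:Int)^(j+1) = 2*c' from by rw [pow_succ]; ring]
    set tmp := PySem.Int.floordiv y (4*c') with htmp
    set r := PySem.Int.mod y (4*c') with hrdef
    have hy : tmp*(4*c') + r = y := PySem.Int.floordiv_mul_add_mod y (4*c')
    have hr0 : 0 ≤ r := PySem.Int.mod_nonneg y (by linarith)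
    have hr4 : r < 4*c' := PySem.Int.mod_lt y (by linarith)
    obtain ⟨p, hp⟩ : ∃ p, tmp * c' = p := ⟨_, rfl⟩
    have hy2 : y = 4*p + r := by rw [← hp]; linarith [hy]
    have hdd : PySem.Int.floordiv (4*c') 2 = 2*c' := by
      rw [PySem.Int.floordiv_eq_ediv_of_pos (by norm_num)]; omega
    have hmul : PySem.Int.floordiv (tmp*(4*c')) 2 = 2*p := by
      rw [PySem.Int.floordiv_eq_ediv_of_pos (by norm_num),
          show tmp*(4*c') = 2*(2*p) from by rw [← hp]; ring]
      exact Int.mul_ediv_cancel_left _ (by norm_num)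
    rw [hdd, hmul, PySem.Int.mod_eq_emod_of_pos (by norm_num : (0:Int) < 2),
        PySem.Int.mod_eq_emod_of_pos (by norm_num : (0:Int) < 2)]
    split_ifs with hx0 hx1 hx2
    · -- v = x
      by_cases hr : r < 2*c' + 1
      · have hq : PySem.Int.floordiv x (2*c') = 2*tmp := by
          rw [PySem.Int.floordiv_eq_iff_of_pos (by linarith)]
          rw [show (2*tmp)*(2*c') = 4*p from by rw [← hp]; ring,
              show (2*tmp+1)*(2*c') = 4*p + 2*c' from by rw [← hp]; ring]
          omega
        rw [hq]; omega
      · have hq : PySem.Int.floordiv x (2*c') = 2*tmp + 1 := by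
          rw [PySem.Int.floordiv_eq_iff_of_pos (by linarith)]
          rw [show (2*tmp+1)*(2*c') = 4*p + 2*c' from by rw [← hp]; ring,
              show (2*tmp+1+1)*(2*c') = 4*p + 4*c' from by rw [← hp]; ring]
          omega
        rw [hq]; omega
    · -- v = 1
      have hq : PySem.Int.floordiv 1 (2*c') = 0 := by
        rw [PySem.Int.floordiv_eq_iff_of_pos (by linarith)]
        constructor <;> nlinarith
      rw [hq]; omega
    · -- v = y
      by_cases hr : r < 2*c'
      · have hq : PySem.Int.floordiv y (2*c') = 2*tmp := by
          rw [PySem.Int.floordiv_eq_iff_of_pos (by linarith)]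
          rw [show (2*tmp)*(2*c') = 4*p from by rw [← hp]; ring,
              show (2*tmp+1)*(2*c') = 4*p + 2*c' from by rw [← hp]; ring]
          omega
        rw [hq]; omega
      · have hq : PySem.Int.floordiv y (2*c') = 2*tmp + 1 := by
          rw [PySem.Int.floordiv_eq_iff_of_pos (by linarith)]
          rw [show (2*tmp+1)*(2*c') = 4*p + 2*c' from by rw [← hp]; ring,
              show (2*tmp+1+1)*(2*c') = 4*p + 4*c' from by rw [← hp]; ring]
          omega
        rw [hq]; omega
    · -- v = 0
      have hq : PySem.Int.floordiv 0 (2*c') = 0 := by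
        rw [PySem.Int.floordiv_eq_ediv_of_pos (by linarith)]; simp
      rw [hq]; omega

-- ===== VERDICT (by name: the statement is the Claim_ definition above) =====
theorem calc_py_spec : Claim_equal_calc_py := by
  intro x _
  unfold Spec_calc_py calc_py calc_py_alt
  have hrange : PySem.List.pyRange 0 64 1 = (List.range 64).map (fun n : Nat => (n:Int)) := by
    decide
  rw [hrange]
  have hA := loopA (x+1) 64 0 rfl
  rw [show List.range' 0 64 = List.range 64 from List.range_eq_range'.symm] at hA
  norm_num at hA
  rw [hA]
  simp only [List.map_map]
  refine congrArg (· ++ [0]) (List.map_congr_left fun i hi => ?_)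
  simpa using gbit_closed x i
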